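-- pv_equiv track=rewrite | github.com/TikSL/Advent-of-Code | 2023/03.py | recuperer_nbr_ligne
-- ===== SOURCE A (Python) =====
-- def recuperer_nbr_ligne(ligne: str):
--     nombres = []
--     i = 0
--     n = len(ligne)
--     while i < n:
--         nombre_dec = []
--         if ligne[i].isdigit():
--             index = i
--             k = 0
--             while i < n and ligne[i].isdigit():
--                 nombre_dec.append(ligne[i])
--                 i += 1
--                 k += 1
--             nombre = 0
--
--             for chiffre in nombre_dec:
--                 nombre = nombre * 10 + int(chiffre)
--             nombres.append((index, nombre))
--         i += 1
--     return nombres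
-- ===== SOURCE B (Python) =====
-- from itertools import groupby
--
--
-- def recuperer_nbr_ligne(ligne: str):
--     nombres = []
--     pos = 0
--     for isdig, grp in groupby(ligne, key=str.isdigit):
--         run = list(grp)
--         if isdig:
--             nombres.append((pos, int(''.join(run))))
--         pos += len(run)
--     return nombres
-- ===== Notes on version B (the rewrite author's own statement) =====
-- stated objective: idiomatic
-- what changed: Replaces A's index-driven outer while loop with a nested per-character digit-collecting while and manual base-10 accumulation by an itertools.groupby pass over maximal same-kind runs with a running position counter and int() on each digit run.
import Mathlib
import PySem

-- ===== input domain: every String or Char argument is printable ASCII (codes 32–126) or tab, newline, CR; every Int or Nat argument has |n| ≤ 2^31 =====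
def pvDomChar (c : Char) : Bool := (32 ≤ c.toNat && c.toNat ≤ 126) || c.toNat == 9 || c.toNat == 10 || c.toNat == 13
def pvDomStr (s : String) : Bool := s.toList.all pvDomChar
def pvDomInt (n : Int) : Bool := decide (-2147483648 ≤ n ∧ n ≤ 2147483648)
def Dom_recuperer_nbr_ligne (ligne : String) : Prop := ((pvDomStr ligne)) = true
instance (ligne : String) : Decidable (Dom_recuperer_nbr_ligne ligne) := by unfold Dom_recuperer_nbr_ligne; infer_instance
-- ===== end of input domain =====

-- B replaces A's index-driven while loops by a groupby pass over maximal same-kind runs (idiomatic); same return value.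

-- ===== PORT A =====
-- inner while: collect the maximal digit prefix, return (collected digits, rest)
def pvATake : List Char → List Char × List Char
  | [] => ([], [])
  | c :: rest =>
    if PySem.Chars.isdigit c then
      let p := pvATake rest
      (c :: p.1, p.2)
    else ([], c :: rest)

theorem pvATake_eq (cs : List Char) :
    pvATake cs = (cs.takeWhile PySem.Chars.isdigit, cs.dropWhile PySem.Chars.isdigit) := by
  induction cs with
  | nil => rfl
  | cons c rest ih =>
    simp only [pvATake, List.takeWhile, List.dropWhile]
    by_cases h : PySem.Chars.isdigit c = true <;> simp [h, ih]

-- outer while over positions; int(chiffre) on an ASCII digit char is ported exactly as c.toNat - 48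
def pvALoop (cs : List Char) (i : Int) : List (Int × Int) :=
  match cs with
  | [] => []
  | c :: rest =>
    if PySem.Chars.isdigit c then
      let p := pvATake (c :: rest)
      let nombre := p.1.foldl (fun acc ch => acc * 10 + ((ch.toNat : Int) - 48)) 0
      (i, nombre) :: pvALoop (p.2.drop 1) (i + p.1.length + 1)
    else
      pvALoop rest (i + 1)
termination_by cs.length
decreasing_by
  · simp only [pvATake_eq]
    have h1 := List.length_dropWhile_le (p := PySem.Chars.isdigit) (l := (c :: rest))
    simp only [List.length_drop, List.length_cons] at h1 ⊢
    omega
  · simp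

def recuperer_nbr_ligne (ligne : String) : List (Int × Int) := pvALoop ligne.toList 0

-- ===== PORT B =====
-- itertools.groupby(ligne, key=str.isdigit): maximal runs of characters with equal isdigit
def pvRuns (cs : List Char) : List (List Char) :=
  match cs with
  | [] => []
  | c :: rest =>
    (c :: rest.takeWhile (fun d => PySem.Chars.isdigit d == PySem.Chars.isdigit c)) ::
      pvRuns (rest.dropWhile (fun d => PySem.Chars.isdigit d == PySem.Chars.isdigit c))
termination_by cs.length
decreasing_by
  have := List.length_dropWhile_le (p := fun d => PySem.Chars.isdigit d == PySem.Chars.isdigit c) (l := rest)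
  simp; omega

-- int(''.join(run)) on a decimal digit run, ported exactly for such runs as the base-10 value
def pvRunVal (run : List Char) : Int :=
  run.foldl (fun acc ch => acc * 10 + ((ch.toNat : Int) - 48)) 0

def recuperer_nbr_ligne_alt (ligne : String) : List (Int × Int) :=
  ((pvRuns ligne.toList).foldl
    (fun (st : List (Int × Int) × Int) run =>
      match run with
      | [] => st                       -- groupby never yields an empty run
      | c :: _ =>
        ((if PySem.Chars.isdigit c then st.1 ++ [(st.2, pvRunVal run)] else st.1),
         st.2 + run.length))
    ([], 0)).1

-- ===== PRECONDITION & SPEC =====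
def Spec_recuperer_nbr_ligne (ligne : String) (out : List (Int × Int)) : Prop := out = recuperer_nbr_ligne_alt ligne
instance (ligne : String) (out : List (Int × Int)) : Decidable (Spec_recuperer_nbr_ligne ligne out) := by unfold Spec_recuperer_nbr_ligne; infer_instance

-- ===== CLAIM (what is proved, stated in full; the proofs are below) =====
def Claim_equal_recuperer_nbr_ligne : Prop := ∀ (ligne : String), Dom_recuperer_nbr_ligne ligne → Spec_recuperer_nbr_ligne ligne (recuperer_nbr_ligne ligne)

-- ===== LEMMAS AND PROOFS =====

-- B's fold, in recursive form
def pvBLoop (rs : List (List Char)) (i : Int) : List (Int × Int) :=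
  match rs with
  | [] => []
  | [] :: rs' => pvBLoop rs' i
  | (c :: t) :: rs' =>
    if PySem.Chars.isdigit c then
      (i, pvRunVal (c :: t)) :: pvBLoop rs' (i + (c :: t).length)
    else
      pvBLoop rs' (i + (c :: t).length)

theorem pvBfold_eq (rs : List (List Char)) (acc : List (Int × Int)) (i : Int) :
    (rs.foldl
      (fun (st : List (Int × Int) × Int) run =>
        match run with
        | [] => st
        | c :: _ =>
          ((if PySem.Chars.isdigit c then st.1 ++ [(st.2, pvRunVal run)] else st.1),
           st.2 + run.length))
      (acc, i)).1 = acc ++ pvBLoop rs i := by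
  induction rs generalizing acc i with
  | nil => simp [pvBLoop]
  | cons r rs' ih =>
    match r with
    | [] => simpa [pvBLoop] using ih acc i
    | c :: t =>
      by_cases h : PySem.Chars.isdigit c = true <;>
        simp [pvBLoop, h, ih, List.append_assoc]

-- equation lemmas
theorem pvALoop_nil (i : Int) : pvALoop [] i = [] := by rw [pvALoop]

theorem pvALoop_cons_digit (c : Char) (rest : List Char) (i : Int)
    (h : PySem.Chars.isdigit c = true) :
    pvALoop (c :: rest) i =
      (i, (c :: rest.takeWhile PySem.Chars.isdigit).foldl
            (fun acc ch => acc * 10 + ((ch.toNat : Int) - 48)) 0) ::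
        pvALoop ((rest.dropWhile PySem.Chars.isdigit).drop 1)
          (i + ((c :: rest.takeWhile PySem.Chars.isdigit).length : Int) + 1) := by
  rw [pvALoop]
  simp [h, pvATake_eq, List.takeWhile_cons_of_pos h, List.dropWhile_cons_of_pos h]

theorem pvALoop_cons_nondigit (c : Char) (rest : List Char) (i : Int)
    (h : PySem.Chars.isdigit c = false) :
    pvALoop (c :: rest) i = pvALoop rest (i + 1) := by
  rw [pvALoop]; simp [h]

theorem pvRuns_cons (c : Char) (rest : List Char) :
    pvRuns (c :: rest) =
      (c :: rest.takeWhile (fun d => PySem.Chars.isdigit d == PySem.Chars.isdigit c)) ::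
        pvRuns (rest.dropWhile (fun d => PySem.Chars.isdigit d == PySem.Chars.isdigit c)) := by
  rw [pvRuns]

-- A skips a block of non-digit characters one at a time
theorem pvALoop_skip (t : List Char) (d : List Char) (i : Int)
    (ht : ∀ x ∈ t, PySem.Chars.isdigit x = false) :
    pvALoop (t ++ d) i = pvALoop d (i + t.length) := by
  induction t generalizing i with
  | nil => simp
  | cons x t' ih =>
    have hx : PySem.Chars.isdigit x = false := ht x (List.mem_cons_self ..)
    rw [List.cons_append, pvALoop_cons_nondigit x _ _ hx,
      ih (i + 1) (fun y hy => ht y (List.mem_cons_of_mem _ hy))]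
    congr 1
    simp only [List.length_cons]
    push_cast
    ring

-- main equivalence: A's index loop = B's run loop
theorem pvLoop_eq (cs : List Char) (i : Int) :
    pvALoop cs i = pvBLoop (pvRuns cs) i := by
  induction hn : cs.length using Nat.strong_induction_on generalizing cs i with
  | _ n ih =>
  match cs with
  | [] => rw [pvALoop_nil, pvRuns, pvBLoop]
  | c :: rest =>
    by_cases h : PySem.Chars.isdigit c = true
    · -- digit run
      have hpred : (fun d => PySem.Chars.isdigit d == PySem.Chars.isdigit c) = PySem.Chars.isdigit := by
        funext d; simp [h]
      rw [pvALoop_cons_digit c rest i h, pvRuns_cons, hpred, pvBLoop]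
      simp only [h, if_true, pvRunVal]
      congr 1
      set ds := rest.takeWhile PySem.Chars.isdigit with hds
      set r := rest.dropWhile PySem.Chars.isdigit with hr
      have hrlen : r.length ≤ rest.length := by rw [hr]; exact List.length_dropWhile_le ..
      match hrr : r with
      | [] =>
        simp only [List.drop_nil]
        rw [pvALoop_nil, pvRuns, pvBLoop]
      | e :: r' =>
        have he : PySem.Chars.isdigit e = false := by
          have hne : rest.dropWhile PySem.Chars.isdigit ≠ [] := by rw [← hr]; simp
          have h2 := List.head_dropWhile_not PySem.Chars.isdigit hne
          have h3 : (rest.dropWhile PySem.Chars.isdigit).head hne = e := by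
            simp [← hr]
          rw [h3] at h2
          simpa using h2
        have hpred2 : (fun d => PySem.Chars.isdigit d == PySem.Chars.isdigit e)
            = (fun d => PySem.Chars.isdigit d == false) := by
          funext d; simp [he]
        rw [List.drop_succ_cons, List.drop_zero, pvRuns_cons, hpred2, pvBLoop]
        simp only [he, Bool.false_eq_true, if_false]
        set t := r'.takeWhile (fun d => PySem.Chars.isdigit d == false) with htdef
        have ht : ∀ x ∈ t, PySem.Chars.isdigit x = false := by
          intro x hx; simpa using List.mem_takeWhile_imp hx
        have hsplit : r' = t ++ r'.dropWhile (fun d => PySem.Chars.isdigit d == false) := by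
          rw [htdef, List.takeWhile_append_dropWhile]
        rw [show r' = t ++ r'.dropWhile (fun d => PySem.Chars.isdigit d == false) from hsplit,
          pvALoop_skip t _ _ ht, ← hsplit]
        have hlen : (r'.dropWhile (fun d => PySem.Chars.isdigit d == false)).length < n := by
          have h1 := List.length_dropWhile_le (p := fun d => PySem.Chars.isdigit d == false) (l := r')
          simp only [List.length_cons] at hrlen hn
          omega
        rw [ih _ hlen _ _ rfl]
        congr 1
        simp only [List.length_cons]
        push_cast
        ring
    · -- non-digit run
      have h' : PySem.Chars.isdigit c = false := by simpa using h
      have hpred : (fun d => PySem.Chars.isdigit d == PySem.Chars.isdigit c)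
          = (fun d => PySem.Chars.isdigit d == false) := by
        funext d; simp [h']
      rw [pvALoop_cons_nondigit c rest i h', pvRuns_cons, hpred, pvBLoop]
      simp only [h', Bool.false_eq_true, if_false]
      set t := rest.takeWhile (fun d => PySem.Chars.isdigit d == false) with htdef
      have ht : ∀ x ∈ t, PySem.Chars.isdigit x = false := by
        intro x hx; simpa using List.mem_takeWhile_imp hx
      have hsplit : rest = t ++ rest.dropWhile (fun d => PySem.Chars.isdigit d == false) := by
        rw [htdef, List.takeWhile_append_dropWhile]
      rw [show rest = t ++ rest.dropWhile (fun d => PySem.Chars.isdigit d == false) from hsplit,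
        pvALoop_skip t _ _ ht, ← hsplit]
      have hlen : (rest.dropWhile (fun d => PySem.Chars.isdigit d == false)).length < n := by
        have h1 := List.length_dropWhile_le (p := fun d => PySem.Chars.isdigit d == false) (l := rest)
        simp only [List.length_cons] at hn
        omega
      rw [ih _ hlen _ _ rfl]
      congr 1
      simp only [List.length_cons]
      push_cast
      ring

-- ===== VERDICT (by name: the statement is the Claim_ definition above) =====
theorem recuperer_nbr_ligne_spec : Claim_equal_recuperer_nbr_ligne := by
  intro ligne _
  unfold Spec_recuperer_nbr_ligne recuperer_nbr_ligne recuperer_nbr_ligne_alt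
  rw [pvBfold_eq, pvLoop_eq]
  simp
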